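-- pv_equiv track=rewrite | github.com/yuangaonyc/euler_project | problem_28.py | layer_opener
-- ===== SOURCE A (Python) =====
-- def layer_opener(layer_num):
-- 	if layer_num == 0:
-- 		return list(range(1,2))
-- 	else:
-- 		start_num = layer_opener(layer_num-1)[-1]+1
-- 		layer_len = layer_num * 8
-- 		end_num = start_num + layer_len
-- 		return list(range(start_num,end_num))
-- ===== SOURCE B (Python) =====
-- def layer_opener(layer_num):
--     # Closed form: layer n (n>=1) starts at (2n-1)^2+1 and has 8n numbers.
--     if layer_num == 0:
--         return [1]
--     start = (2 * layer_num - 1) ** 2 + 1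
--     return list(range(start, start + 8 * layer_num))
-- ===== Notes on version B (the rewrite author's own statement) =====
-- stated objective: faster
-- what changed: Replaces the recursion through all previous layers with the closed-form start index (2n-1)^2+1 and a single range of length 8n.
import Mathlib
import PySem

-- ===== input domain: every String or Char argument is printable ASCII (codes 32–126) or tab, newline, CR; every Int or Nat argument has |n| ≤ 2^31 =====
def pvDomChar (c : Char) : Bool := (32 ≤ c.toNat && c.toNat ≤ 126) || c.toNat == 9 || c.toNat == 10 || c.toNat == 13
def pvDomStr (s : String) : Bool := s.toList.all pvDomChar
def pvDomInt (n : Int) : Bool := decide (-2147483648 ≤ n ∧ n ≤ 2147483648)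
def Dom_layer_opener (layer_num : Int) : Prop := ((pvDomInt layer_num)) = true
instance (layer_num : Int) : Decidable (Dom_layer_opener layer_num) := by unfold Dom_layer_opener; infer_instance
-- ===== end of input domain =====

-- B replaces A's recursion through all previous layers by the closed-form start (2n-1)^2+1 (objective: faster, asymptotic).


-- ===== PORT A =====
-- A recurses on layer_num-1; for layer_num < 0 the Python never terminates (RecursionError),
-- so the port recurses on the Nat view layer_num.toNat (Pre_ restricts to 0 ≤ layer_num).
def layer_openerA : Nat → List Int
  | 0 => PySem.List.pyRange 1 2 1
  | k+1 =>
    -- start_num = layer_opener(layer_num-1)[-1]+1 ; the [-1] cannot raise (the list is nonempty)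
    match PySem.List.pyGet? (layer_openerA k) (-1) with
    | some last =>
      let start_num : Int := last + 1
      let layer_len : Int := ((k : Int) + 1) * 8
      let end_num : Int := start_num + layer_len
      PySem.List.pyRange start_num end_num 1
    | none => []  -- unreachable: every layer list is nonempty

def layer_opener (layer_num : Int) : List Int := layer_openerA layer_num.toNat

-- ===== PORT B =====
def layer_opener_alt (layer_num : Int) : List Int :=
  if layer_num == 0 then [1]
  else
    let start : Int := (2 * layer_num - 1) ^ 2 + 1
    PySem.List.pyRange start (start + 8 * layer_num) 1

-- ===== PRECONDITION & SPEC =====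
-- Pre_ excludes negative layer_num, on which the Python A recurses forever (RecursionError).
def Pre_layer_opener (layer_num : Int) : Prop := 0 ≤ layer_num
instance (layer_num : Int) : Decidable (Pre_layer_opener layer_num) := by unfold Pre_layer_opener; infer_instance
def pvWitness_layer_opener : Int := 3

def Spec_layer_opener (layer_num : Int) (out : List Int) : Prop := out = layer_opener_alt layer_num
instance (layer_num : Int) (out : List Int) : Decidable (Spec_layer_opener layer_num out) := by unfold Spec_layer_opener; infer_instance

-- ===== CLAIM (what is proved, stated in full; the proofs are below) =====
def Claim_equal_layer_opener : Prop := ∀ (layer_num : Int), Dom_layer_opener layer_num → Pre_layer_opener layer_num → Spec_layer_opener layer_num (layer_opener layer_num)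

-- ===== LEMMAS AND PROOFS =====

-- The last element of layer k is (2k+1)^2.
theorem last_layerA (k : Nat) :
    PySem.List.pyGet? (layer_openerA k) (-1) = some ((2 * (k : Int) + 1) ^ 2) := by
  induction k with
  | zero => decide
  | succ k ih =>
    rw [layer_openerA, ih]
    dsimp only
    have h1 : ((2*(k:Int)+1)^2 + 1) ≤ (2*(k:Int)+1)^2 + ((k:Int)+1)*8 := by nlinarith
    have hE : (2*(k:Int)+1)^2 + 1 + ((k:Int)+1)*8 = ((2*(k:Int)+1)^2 + ((k:Int)+1)*8) + 1 := by ring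
    rw [hE, PySem.List.pyRange_one_succ_right h1,
        PySem.List.pyGet?_neg_one_append_singleton]
    congr 1
    push_cast
    ring

theorem layerA_closed (k : Nat) :
    layer_openerA (k+1)
      = PySem.List.pyRange ((2*((k:Int)+1) - 1)^2 + 1) ((2*((k:Int)+1) - 1)^2 + 1 + 8*((k:Int)+1)) 1 := by
  rw [layer_openerA, last_layerA]
  dsimp only
  congr 1
  all_goals ring

-- ===== VERDICT (by name: the statement is the Claim_ definition above) =====
theorem layer_opener_spec : Claim_equal_layer_opener := by
  intro n _ hpre
  unfold Spec_layer_opener layer_opener layer_opener_alt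
  rcases Int.eq_ofNat_of_zero_le hpre with ⟨k, rfl⟩
  cases k with
  | zero => decide
  | succ k =>
    have hne : ((k:Int) + 1 : Int) ≠ 0 := by positivity
    rw [Int.toNat_natCast, layerA_closed]
    simp only [Nat.cast_add, Nat.cast_one, beq_iff_eq]
    rw [if_neg hne]
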